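-- pv_equiv track=rewrite | github.com/shawc71/adoc_2021 | src/day14/sol.py | parse
-- ===== SOURCE A (Python) =====
-- def parse(data):
--     PARSING_TEMPLATE = 0
--     PARSING_RULES = 1
--     state = PARSING_TEMPLATE
--     template = ""
--     rules = {}
--     for line in data:
--         line = line.strip()
--         if line == "":
--             state = PARSING_RULES
--             continue
--         if state == PARSING_TEMPLATE:
--             template = line
--         else:
--             key, val = line.split(" -> ")
--             rules[key] = val
--     return template, rules
-- ===== SOURCE B (Python) =====
-- def parse(data):
--     lines = [line.strip() for line in data]
--     try:
--         sep = lines.index("")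
--     except ValueError:
--         sep = len(lines)
--     head = lines[:sep]
--     template = head[-1] if head else ""
--     rules = {}
--     for line in lines[sep:]:
--         if line == "":
--             continue
--         key, val = line.split(" -> ")
--         rules[key] = val
--     return template, rules
-- ===== Notes on version B (the rewrite author's own statement) =====
-- stated objective: simpler
-- what changed: Replaces A's two-state machine threaded through one loop with a direct decomposition: strip all lines, locate the first blank line, take the last line of the prefix as the template and fold the rules dict over the suffix.
import Mathlib
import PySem

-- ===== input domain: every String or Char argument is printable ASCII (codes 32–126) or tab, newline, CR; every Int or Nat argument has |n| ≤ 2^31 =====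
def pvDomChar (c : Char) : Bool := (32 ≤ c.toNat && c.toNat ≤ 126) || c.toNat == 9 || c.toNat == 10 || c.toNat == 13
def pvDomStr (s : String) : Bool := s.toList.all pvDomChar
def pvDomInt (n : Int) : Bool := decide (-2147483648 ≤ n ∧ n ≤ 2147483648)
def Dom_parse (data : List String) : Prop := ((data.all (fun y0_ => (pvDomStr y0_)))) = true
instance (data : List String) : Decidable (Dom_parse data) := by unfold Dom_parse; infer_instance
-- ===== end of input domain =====

-- ===== PORT A =====
-- B differs by decomposition: A threads a two-state machine through one loop; B splits the
-- stripped lines at the first blank and processes the two slices separately.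

-- one iteration of A's loop body, applied to the already-stripped line
def parseStepS (acc : Bool × String × PySem.Dict String String) (line : String) :
    Bool × String × PySem.Dict String String :=
  if line = "" then (true, acc.2.1, acc.2.2)
  else if acc.1 = false then (false, line, acc.2.2)
  else match PySem.Str.split? line " -> " with
    | some [k, v] => (true, acc.2.1, acc.2.2.insert k v)
    | _ => (true, acc.2.1, acc.2.2)   -- unreachable under Pre_parse (Python raises ValueError)

def parse (data : List String) : String × (List (String × String)) :=
  let r := data.foldl (fun acc line => parseStepS acc (PySem.Str.strip line))
    (false, "", PySem.Dict.empty)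
  (r.2.1, r.2.2.items)

-- ===== PORT B =====
-- body of B's rules loop (skips blank lines)
def rulesStep (d : PySem.Dict String String) (line : String) : PySem.Dict String String :=
  if line = "" then d
  else match PySem.Str.split? line " -> " with
    | some [k, v] => d.insert k v
    | _ => d   -- unreachable under Pre_parse (Python raises ValueError)

def parse_alt (data : List String) : String × (List (String × String)) :=
  let lines := data.map PySem.Str.strip
  let sep : Nat := (PySem.List.index? lines "").getD lines.length
  let head := PySem.List.slice lines none (some (sep : Int))
  let template := head.getLastD ""
  let rules := (PySem.List.slice lines (some (sep : Int)) none).foldl rulesStep PySem.Dict.empty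
  (template, rules.items)

-- ===== PRECONDITION & SPEC =====
-- Pre_ excludes exactly the inputs where Python raises ValueError: a non-blank stripped line
-- after the first blank line that does not split on " -> " into exactly two pieces.
def Pre_parse (data : List String) : Prop :=
  ∀ line ∈ (data.map PySem.Str.strip).drop
      ((PySem.List.index? (data.map PySem.Str.strip) "").getD (data.map PySem.Str.strip).length),
    line ≠ "" → ((PySem.Str.split? line " -> ").getD []).length = 2
instance (data : List String) : Decidable (Pre_parse data) := by unfold Pre_parse; infer_instance

def pvWitness_parse : List String := ["NN", "NC", "", "NC -> B", " CB -> H "]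

def Spec_parse (data : List String) (out : String × (List (String × String))) : Prop := out = parse_alt data
instance (data : List String) (out : String × (List (String × String))) : Decidable (Spec_parse data out) := by unfold Spec_parse; infer_instance

-- ===== CLAIM (what is proved, stated in full; the proofs are below) =====
def Claim_equal_parse : Prop := ∀ (data : List String), Dom_parse data → Pre_parse data → Spec_parse data (parse data)

-- ===== LEMMAS AND PROOFS =====

-- once A's state machine has switched to rule-parsing it stays there and acts as B's rules loop
lemma foldl_parseStepS_true (l : List String) (t : String) (d : PySem.Dict String String) :
    l.foldl parseStepS (true, t, d) = (true, t, l.foldl rulesStep d) := by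
  induction l generalizing d with
  | nil => rfl
  | cons x xs ih =>
      simp only [List.foldl_cons]
      have hstep : parseStepS (true, t, d) x = (true, t, rulesStep d x) := by
        unfold parseStepS rulesStep
        by_cases hx : x = ""
        · simp [hx]
        · simp only [if_neg hx]
          rcases PySem.Str.split? x " -> " with _ | (_ | ⟨k, _ | ⟨v, _ | _⟩⟩) <;> rfl
      rw [hstep, ih]

-- the first component of the accumulator after sep+1 helper
lemma sep_cons_of_ne (x : String) (xs : List String) (hx : x ≠ "") :
    ((PySem.List.index? (x :: xs) "").getD (x :: xs).length) =
      ((PySem.List.index? xs "").getD xs.length) + 1 := by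
  rw [PySem.List.index?_cons_of_ne xs hx]
  cases PySem.List.index? xs "" <;> simp

-- A's whole loop, started in template state, computes B's decomposition
lemma foldl_parseStepS_false (l : List String) (t : String) (d : PySem.Dict String String) :
    l.foldl parseStepS (false, t, d) =
      ((PySem.List.index? l "").isSome,
       (l.take ((PySem.List.index? l "").getD l.length)).getLastD t,
       (l.drop ((PySem.List.index? l "").getD l.length)).foldl rulesStep d) := by
  induction l generalizing t d with
  | nil => simp [PySem.List.index?_eq_idxOf?, List.idxOf?]
  | cons x xs ih =>
      by_cases hx : x = ""
      · subst hx
        simp only [List.foldl_cons]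
        have hstep : parseStepS (false, t, d) "" = (true, t, d) := by rfl
        rw [hstep, foldl_parseStepS_true]
        rw [PySem.List.index?_cons_self]
        have hblank : rulesStep d "" = d := by rfl
        simp [hblank]
      · simp only [List.foldl_cons]
        have hstep : parseStepS (false, t, d) x = (false, x, d) := by
          unfold parseStepS; simp [hx]
        rw [hstep, ih, sep_cons_of_ne x xs hx, PySem.List.index?_cons_of_ne xs hx]
        simp only [List.take_succ_cons, List.drop_succ_cons, Option.isSome_map, List.getLastD_cons]

-- ===== VERDICT (by name: the statement is the Claim_ definition above) =====
theorem parse_spec : Claim_equal_parse := by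
  intro data _ _
  unfold Spec_parse
  simp only [parse, parse_alt]
  rw [← List.foldl_map (f := PySem.Str.strip) (g := parseStepS)]
  rw [foldl_parseStepS_false, PySem.List.slice_to_natCast, PySem.List.slice_from_natCast]
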